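-- pv_equiv track=rewrite | github.com/segfaulthunter/pypentago | src/pypentago/pgn.py | get_game_pgn
-- ===== SOURCE A (Python) =====
-- def to_pgn(field, row, column, rot_dir, rot_field):
--     """ Convert (field, row, column, rot_dir, rot_field) to a PGN string """
--     field = chr(ord("A")+int(field))
--     row = chr(ord("a")+int(row))
--     col = int(column)+1
--     rot_dir = str(rot_dir)
--     rot_field = chr(ord("A")+int(rot_field))
--     return "".join([str(a) for a in (field, row, col, rot_dir, rot_field)])
--
-- def get_game_pgn(turns):
--     lines = []
--     max_elem = len(turns)-1
--     lock = False
--     for i, turn in enumerate(turns):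
--         if lock:
--             lock = False
--             continue
--         if i != max_elem:
--             lines.append("%s\t%s" % (to_pgn(*turn), to_pgn(*turns[i+1])))
--             lock = True
--         else:
--             lines.append(to_pgn(*turn))
--     return "\n".join(lines)
-- ===== SOURCE B (Python) =====
-- def to_pgn(field, row, column, rot_dir, rot_field):
--     """ Convert (field, row, column, rot_dir, rot_field) to a PGN string """
--     field = chr(ord("A")+int(field))
--     row = chr(ord("a")+int(row))
--     col = int(column)+1
--     rot_dir = str(rot_dir)
--     rot_field = chr(ord("A")+int(rot_field))
--     return "".join([str(a) for a in (field, row, col, rot_dir, rot_field)])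
--
-- def get_game_pgn(turns):
--     pgns = [to_pgn(*t) for t in turns]
--     lines = []
--     for i in range(0, len(pgns), 2):
--         lines.append("\t".join(pgns[i:i+2]))
--     return "\n".join(lines)
-- ===== Notes on version B (the rewrite author's own statement) =====
-- stated objective: simpler
-- what changed: replaces A's single-pass lock-flag state machine with lookahead indexing and a max_elem special case by a two-phase build: first format every turn into its PGN token, then chunk the token list by striding indices two at a time and tab-joining each slice (a one-element final slice handles the odd tail with no special case)
import Mathlib
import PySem

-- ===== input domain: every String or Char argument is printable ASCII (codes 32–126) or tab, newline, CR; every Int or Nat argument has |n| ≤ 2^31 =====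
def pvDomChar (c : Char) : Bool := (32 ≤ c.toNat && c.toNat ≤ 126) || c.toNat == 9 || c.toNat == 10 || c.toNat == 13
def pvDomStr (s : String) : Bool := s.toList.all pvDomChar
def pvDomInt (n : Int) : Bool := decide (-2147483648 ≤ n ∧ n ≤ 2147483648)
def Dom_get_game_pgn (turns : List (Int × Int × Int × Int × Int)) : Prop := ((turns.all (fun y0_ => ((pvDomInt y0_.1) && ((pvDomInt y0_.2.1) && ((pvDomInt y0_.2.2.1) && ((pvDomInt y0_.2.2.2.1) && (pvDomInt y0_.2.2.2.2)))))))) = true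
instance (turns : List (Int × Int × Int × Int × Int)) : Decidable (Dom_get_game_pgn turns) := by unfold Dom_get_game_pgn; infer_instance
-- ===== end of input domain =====

-- B replaces A's lock-flag state machine with a two-phase build (format all tokens, then
-- tab-join stride-2 slices); objective: simpler. Proved equal on Pre_ (valid chr arguments).


-- ===== PORT A =====
-- chr(n): exact for the codepoints Pre_ admits (valid, non-surrogate scalar values)
def pyChr (n : Int) : String := String.ofList [Char.ofNat n.toNat]

-- to_pgn(field, row, column, rot_dir, rot_field); "".join of the five str pieces is concatenation
def to_pgn (field row column rot_dir rot_field : Int) : String :=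
  pyChr (65 + field) ++ pyChr (97 + row) ++ PySem.Int.toStr (column + 1) ++
    PySem.Int.toStr rot_dir ++ pyChr (65 + rot_field)

-- to_pgn(*turn)
def to_pgnT (t : Int × Int × Int × Int × Int) : String :=
  to_pgn t.1 t.2.1 t.2.2.1 t.2.2.2.1 t.2.2.2.2

-- loop body of A: state (lines, lock), element (i, turn); turns[i+1] is always in range
-- when taken (i ≠ max_elem), so the pyGetD default is never used
def pgnStepA (turns : List (Int × Int × Int × Int × Int))
    (st : List String × Bool) (p : Int × (Int × Int × Int × Int × Int)) :
    List String × Bool :=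
  if st.2 then (st.1, false)
  else if p.1 ≠ (turns.length : Int) - 1 then
    (st.1 ++ [to_pgnT p.2 ++ "\t" ++ to_pgnT (PySem.List.pyGetD turns (p.1 + 1) (0, 0, 0, 0, 0))], true)
  else
    (st.1 ++ [to_pgnT p.2], st.2)

def get_game_pgn (turns : List (Int × Int × Int × Int × Int)) : String :=
  PySem.Str.join "\n" ((PySem.List.enumerate turns).foldl (pgnStepA turns) ([], false)).1

-- ===== PORT B =====
-- loop body of B: lines.append("\t".join(pgns[i:i+2]))
def pgnStepB (pgns : List String) (acc : List String) (i : Int) : List String :=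
  acc ++ [PySem.Str.join "\t" (PySem.List.slice pgns (some i) (some (i + 2)))]

def get_game_pgn_alt (turns : List (Int × Int × Int × Int × Int)) : String :=
  let pgns := turns.map to_pgnT
  PySem.Str.join "\n"
    ((PySem.List.pyRange 0 (pgns.length : Int) 2).foldl (pgnStepB pgns) [])

-- ===== PRECONDITION & SPEC =====
-- Pre_ excludes turns on which chr raises ValueError (codepoint outside 0..0x10FFFF, so A
-- raises) and turns whose chr yields a lone surrogate (0xD800..0xDFFF): there A returns a
-- non-scalar Python string that Lean's Char/String cannot represent, so it is unportable.
def pvChrOk (n : Int) : Bool :=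
  (decide (0 ≤ n) && decide (n ≤ 1114111)) && !(decide (55296 ≤ n) && decide (n ≤ 57343))

def Pre_get_game_pgn (turns : List (Int × Int × Int × Int × Int)) : Prop :=
  (turns.all (fun t => pvChrOk (65 + t.1) && pvChrOk (97 + t.2.1) && pvChrOk (65 + t.2.2.2.2))) = true

instance (turns : List (Int × Int × Int × Int × Int)) : Decidable (Pre_get_game_pgn turns) := by
  unfold Pre_get_game_pgn; infer_instance

def pvWitness_get_game_pgn : (List (Int × Int × Int × Int × Int)) :=
  [(0, 0, 0, 0, 0), (1, 2, 3, 1, 1), (3, 5, 5, -1, 2)]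

def Spec_get_game_pgn (turns : List (Int × Int × Int × Int × Int)) (out : String) : Prop := out = get_game_pgn_alt turns
instance (turns : List (Int × Int × Int × Int × Int)) (out : String) : Decidable (Spec_get_game_pgn turns out) := by unfold Spec_get_game_pgn; infer_instance

-- ===== CLAIM (what is proved, stated in full; the proofs are below) =====
def Claim_equal_get_game_pgn : Prop := ∀ (turns : List (Int × Int × Int × Int × Int)), Dom_get_game_pgn turns → Pre_get_game_pgn turns → Spec_get_game_pgn turns (get_game_pgn turns)

-- ===== LEMMAS AND PROOFS =====

-- the common shape of both line lists: tokens chunked two at a time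
def pvChunk : List String → List String
  | [] => []
  | [x] => [x]
  | x :: y :: r => (x ++ "\t" ++ y) :: pvChunk r

theorem pv_join_tab_one (x : String) : PySem.Str.join "\t" [x] = x := by
  simp [PySem.Str.join, PySem.Chars.join_singleton]

theorem pv_join_tab_two (x y : String) : PySem.Str.join "\t" [x, y] = x ++ "\t" ++ y := by
  rw [← String.ofList_toList (s := x ++ "\t" ++ y)]
  simp [PySem.Str.join, PySem.Chars.join_cons_cons, PySem.Chars.join_singleton,
    String.toList_append]

theorem pv_keyA (T : List (Int × Int × Int × Int × Int)) :
    ∀ (suf : List (Int × Int × Int × Int × Int)) (k : Nat) (acc : List String),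
      T.drop k = suf → k + suf.length = T.length →
      ((PySem.List.enumerate suf (k : Int)).foldl (pgnStepA T) (acc, false)).1
        = acc ++ pvChunk (suf.map to_pgnT)
  | [], k, acc, h1, h2 => by
    simp [PySem.List.enumerate, pvChunk]
  | [x], k, acc, h1, h2 => by
    simp only [List.length_cons, List.length_nil] at h2
    rw [PySem.List.enumerate_cons]
    simp only [List.foldl_cons]
    have hk : (k : Int) = (T.length : Int) - 1 := by omega
    simp [PySem.List.enumerate, pgnStepA, hk, pvChunk]
  | x :: y :: r, k, acc, h1, h2 => by
    simp only [List.length_cons] at h2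
    rw [PySem.List.enumerate_cons, PySem.List.enumerate_cons]
    simp only [List.foldl_cons]
    have h4 : T.drop (k + 1) = y :: r := by
      have h3 : (T.drop k).drop 1 = y :: r := by rw [h1]; rfl
      rwa [List.drop_drop] at h3
    have hy : PySem.List.pyGetD T ((k : Int) + 1) (0, 0, 0, 0, 0) = y := by
      rw [PySem.List.pyGetD_eq_getElem T _ (by omega) (by omega)]
      have h6 : (List.drop (k + 1) T).head? = T[k + 1]? := List.head?_drop
      rw [h4] at h6
      have h7 : T[k + 1]? = some y := h6.symm
      rw [List.getElem?_eq_some_iff] at h7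
      obtain ⟨hlt, hv⟩ := h7
      simp only [show ((k : Int) + 1).toNat = k + 1 by omega]
      exact hv
    have hcond : ((k : Int) ≠ (T.length : Int) - 1) := by omega
    have e1 : pgnStepA T (acc, false) ((k : Int), x)
        = (acc ++ [to_pgnT x ++ "\t" ++ to_pgnT y], true) := by
      simp [pgnStepA, hcond, hy]
    have e2 : pgnStepA T (acc ++ [to_pgnT x ++ "\t" ++ to_pgnT y], true) ((k : Int) + 1, y)
        = (acc ++ [to_pgnT x ++ "\t" ++ to_pgnT y], false) := by
      simp [pgnStepA]
    rw [e1, e2]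
    have h8 : T.drop (k + 2) = r := by
      have h3 : (T.drop (k + 1)).drop 1 = r := by rw [h4]; rfl
      rwa [List.drop_drop] at h3
    rw [show (k : Int) + 1 + 1 = ((k + 2 : Nat) : Int) by push_cast; ring]
    rw [pv_keyA T r (k + 2) _ h8 (by omega)]
    simp [pvChunk]

theorem pv_range_two_nil (a b : Int) (h : b ≤ a) : PySem.List.pyRange a b 2 = [] := by
  rw [PySem.List.pyRange_of_pos a b (by norm_num)]
  simp [show ¬ a < b by omega]

theorem pv_range_two_cons (a b : Int) (h : a < b) :
    PySem.List.pyRange a b 2 = a :: PySem.List.pyRange (a + 2) b 2 := by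
  rw [PySem.List.pyRange_of_pos a b (by norm_num),
    PySem.List.pyRange_of_pos (a + 2) b (by norm_num)]
  have hc : ((b - a + 2 - 1) / 2).toNat
      = (if a + 2 < b then ((b - (a + 2) + 2 - 1) / 2).toNat else 0) + 1 := by
    split_ifs with h2 <;> omega
  rw [if_pos h, hc, List.range_succ_eq_map]
  simp [List.map_map, Function.comp]
  intro k _
  ring

theorem pv_keyB (P : List String) :
    ∀ (suf : List String) (k : Nat) (acc : List String),
      P.drop k = suf → k + suf.length = P.length →
      (PySem.List.pyRange (k : Int) (P.length : Int) 2).foldl (pgnStepB P) acc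
        = acc ++ pvChunk suf
  | [], k, acc, h1, h2 => by
    simp only [List.length_nil] at h2
    rw [pv_range_two_nil _ _ (by omega)]
    simp [pvChunk]
  | [x], k, acc, h1, h2 => by
    simp only [List.length_cons, List.length_nil] at h2
    rw [pv_range_two_cons _ _ (by omega)]
    simp only [List.foldl_cons]
    rw [show (k : Int) + 2 = ((k + 2 : Nat) : Int) by push_cast; ring]
    rw [pv_range_two_nil _ _ (by omega)]
    have hs : PySem.List.slice P (some (k : Int)) (some ((k : Int) + 2)) = [x] := by
      rw [show ((2 : Int)) = ((2 : Nat) : Int) from rfl, PySem.List.slice_natCast_add, h1]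
      simp
    simp [pgnStepB, hs, pv_join_tab_one, pvChunk]
  | x :: y :: r, k, acc, h1, h2 => by
    simp only [List.length_cons] at h2
    rw [pv_range_two_cons _ _ (by omega)]
    simp only [List.foldl_cons]
    have hs : PySem.List.slice P (some (k : Int)) (some ((k : Int) + 2)) = [x, y] := by
      rw [show ((2 : Int)) = ((2 : Nat) : Int) from rfl, PySem.List.slice_natCast_add, h1]
      simp
    have hr : P.drop (k + 2) = r := by
      have h3 : (P.drop k).drop 2 = r := by rw [h1]; rfl
      rwa [List.drop_drop] at h3
    rw [show (k : Int) + 2 = ((k + 2 : Nat) : Int) by push_cast; ring]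
    rw [pv_keyB P r (k + 2) _ hr (by omega)]
    simp [pgnStepB, hs, pv_join_tab_two, pvChunk]


-- ===== VERDICT (by name: the statement is the Claim_ definition above) =====
theorem get_game_pgn_spec : Claim_equal_get_game_pgn := by
  intro turns _ _
  unfold Spec_get_game_pgn get_game_pgn get_game_pgn_alt
  have hA := pv_keyA turns turns 0 [] (by simp) (by simp)
  have hB := pv_keyB (turns.map to_pgnT) (turns.map to_pgnT) 0 [] (by simp) (by simp)
  simp only [Nat.cast_zero] at hA hB
  simp only [hA, hB, List.nil_append]
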